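-- pv_equiv track=rewrite | github.com/BS-Algo/Algorithm | minjaeYoon/2025/2025-08/0811.py | bfs
-- ===== SOURCE A (Python) =====
-- from collections import deque
--
-- def bfs(width, height):
--     width, height = min(width, height), max(width, height)
--
--     if width == 1 and height == 1:
--         return 0
--
--     queue = deque([(width, height)])
--     cut_count = 0
--
--     while queue:
--         level_size = len(queue)
--
--         for _ in range(level_size):
--             w, h = queue.popleft()
--
--             if w == 1 and h == 1:
--                 continue
--
--             w, h = min(w, h), max(w, h)
--
--             piece1_h = h // 2
--             piece2_h = h - piece1_h
--
--             queue.append((w, piece1_h))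
--             queue.append((w, piece2_h))
--
--         if queue:
--             cut_count += 1
--
--     return cut_count
-- ===== SOURCE B (Python) =====
-- def bfs(width, height):
--     return (width - 1).bit_length() + (height - 1).bit_length()
-- ===== Notes on version B (the rewrite author's own statement) =====
-- stated objective: faster
-- what changed: Replaced the level-by-level BFS over an exponentially growing queue of pieces with the closed form ceil(log2 width)+ceil(log2 height) computed via int.bit_length.
import Mathlib
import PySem

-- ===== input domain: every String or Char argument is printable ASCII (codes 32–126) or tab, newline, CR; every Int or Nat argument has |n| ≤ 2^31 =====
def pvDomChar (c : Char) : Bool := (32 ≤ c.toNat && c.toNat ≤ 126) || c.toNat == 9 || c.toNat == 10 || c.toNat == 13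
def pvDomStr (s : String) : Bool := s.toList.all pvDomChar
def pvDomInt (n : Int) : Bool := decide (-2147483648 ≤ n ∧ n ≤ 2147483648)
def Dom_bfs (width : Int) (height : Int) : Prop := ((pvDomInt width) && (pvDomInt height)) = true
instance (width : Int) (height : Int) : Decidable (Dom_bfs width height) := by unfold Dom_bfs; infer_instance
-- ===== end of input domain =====

-- B replaces A's level-by-level BFS over a queue of rectangle pieces by the closed form
-- bit_length(width-1) + bit_length(height-1); objective: faster (O(1) vs a queue that doubles every round).

-- ===== PORT A =====
-- one BFS level: pop all pieces of the level in order, append the two halves of each non-1x1 piece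
-- (the deque's O(1) tail-appends are ported with a reverse accumulator: cons both children, reverse at the end)
def bfsLevel (q : List (Int × Int)) : List (Int × Int) :=
  (q.foldl (fun acc p =>
    if p.1 = 1 ∧ p.2 = 1 then acc
    else
      let w := min p.1 p.2
      let h := max p.1 p.2
      let piece1 := PySem.Int.floordiv h 2
      (w, h - piece1) :: (w, piece1) :: acc) []).reverse

-- the 'while queue:' loop; fuel only makes the definition total (the Python loop diverges
-- for a nonpositive side, which Pre_bfs excludes; inside Pre_bfs the fuel never runs out)
def bfsLoop : Nat → List (Int × Int) → Int → Int
  | _, [], c => c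
  | 0, _, c => c
  | Nat.succ f, q, c =>
      let q' := bfsLevel q
      bfsLoop f q' (if q'.isEmpty then c else c + 1)

def bfs (width : Int) (height : Int) : Int :=
  let w := min width height
  let h := max width height
  if w = 1 ∧ h = 1 then 0
  else bfsLoop (PySem.Int.bitLength (w - 1) + PySem.Int.bitLength (h - 1) + 2) [(w, h)] 0

-- ===== PORT B =====
def bfs_alt (width : Int) (height : Int) : Int :=
  ((PySem.Int.bitLength (width - 1) + PySem.Int.bitLength (height - 1) : Nat) : Int)

-- ===== PRECONDITION & SPEC =====
-- Pre_ excludes nonpositive sides, on which A's BFS loop never terminates (A returns on no such input).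
def Pre_bfs (width : Int) (height : Int) : Prop := 1 ≤ width ∧ 1 ≤ height
instance (width : Int) (height : Int) : Decidable (Pre_bfs width height) := by unfold Pre_bfs; infer_instance
def pvWitness_bfs : Int × Int := (7, 5)

def Spec_bfs (width : Int) (height : Int) (out : Int) : Prop := out = bfs_alt width height
instance (width : Int) (height : Int) (out : Int) : Decidable (Spec_bfs width height out) := by unfold Spec_bfs; infer_instance

-- ===== CLAIM (what is proved, stated in full; the proofs are below) =====
def Claim_equal_bfs : Prop := ∀ (width : Int) (height : Int), Dom_bfs width height → Pre_bfs width height → Spec_bfs width height (bfs width height)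

-- ===== LEMMAS AND PROOFS =====

-- number of halving rounds a single (positive) piece needs
def pieceG (p : Int × Int) : Nat :=
  PySem.Int.bitLength (p.1 - 1) + PySem.Int.bitLength (p.2 - 1)

-- all pieces have positive sides
def posQ (q : List (Int × Int)) : Prop := ∀ p ∈ q, 1 ≤ p.1 ∧ 1 ≤ p.2

-- maximum of pieceG over the queue
def maxG (q : List (Int × Int)) : Nat := q.foldr (fun p m => max (pieceG p) m) 0

-- the two children of a non-1x1 piece, [] for a 1x1 piece
def child (p : Int × Int) : List (Int × Int) :=
  if p.1 = 1 ∧ p.2 = 1 then []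
  else
    let w := min p.1 p.2
    let h := max p.1 p.2
    let piece1 := PySem.Int.floordiv h 2
    [(w, piece1), (w, h - piece1)]

lemma bfsLevel_foldl (q : List (Int × Int)) (acc : List (Int × Int)) :
    q.foldl (fun acc p =>
      if p.1 = 1 ∧ p.2 = 1 then acc
      else
        let w := min p.1 p.2
        let h := max p.1 p.2
        let piece1 := PySem.Int.floordiv h 2
        (w, h - piece1) :: (w, piece1) :: acc) acc = (q.flatMap child).reverse ++ acc := by
  induction q generalizing acc with
  | nil => simp
  | cons x xs ih =>
    rw [List.foldl_cons, List.flatMap_cons, ih]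
    unfold child
    split_ifs with h
    · simp
    · simp

lemma bfsLevel_eq_flatMap (q : List (Int × Int)) : bfsLevel q = q.flatMap child := by
  unfold bfsLevel
  rw [bfsLevel_foldl]
  simp

lemma bitLength_mono {a b : Int} (ha : 0 ≤ a) (hab : a ≤ b) :
    PySem.Int.bitLength a ≤ PySem.Int.bitLength b := by
  rcases eq_or_lt_of_le ha with h0 | h0
  · have : a = 0 := h0.symm
    subst this
    simp [show PySem.Int.bitLength 0 = 0 from by decide]
  · by_contra hlt
    have hble : PySem.Int.bitLength b ≤ PySem.Int.bitLength a - 1 := by omega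
    have h1 : b.natAbs < 2 ^ PySem.Int.bitLength b := PySem.Int.lt_two_pow_bitLength b
    have h2 : 2 ^ (PySem.Int.bitLength a - 1) ≤ a.natAbs :=
      PySem.Int.two_pow_bitLength_le a (by omega)
    have h3 : (2 : Nat) ^ PySem.Int.bitLength b ≤ 2 ^ (PySem.Int.bitLength a - 1) :=
      Nat.pow_le_pow_right (by norm_num) hble
    have : a.natAbs ≤ b.natAbs := by omega
    omega

lemma bitLength_pos {a : Int} (ha : 1 ≤ a) : 1 ≤ PySem.Int.bitLength a := by
  rw [PySem.Int.bitLength_of_pos (by omega)]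
  omega

-- ceiling child: bitLength (⌈h/2⌉ - 1) + 1 = bitLength (h - 1) for h ≥ 2
lemma ceil_child {h : Int} (hh : 2 ≤ h) :
    PySem.Int.bitLength (h - PySem.Int.floordiv h 2 - 1) + 1 = PySem.Int.bitLength (h - 1) := by
  set m : Nat := (h - 1).toNat with hm
  have hm1 : 1 ≤ m := by omega
  have hcast : h - 1 = (m : Int) := by omega
  have hdiv : PySem.Int.floordiv h 2 = h / 2 := PySem.Int.floordiv_eq_ediv_of_pos (by norm_num)
  have hceil : h - PySem.Int.floordiv h 2 - 1 = ((m / 2 : Nat) : Int) := by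
    rw [hdiv]
    omega
  rw [hceil, hcast]
  exact (PySem.Int.bitLength_natCast hm1).symm

-- floor child: bitLength (⌊h/2⌋ - 1) + 1 ≤ bitLength (h - 1) for h ≥ 2
lemma floor_child {h : Int} (hh : 2 ≤ h) :
    PySem.Int.bitLength (PySem.Int.floordiv h 2 - 1) + 1 ≤ PySem.Int.bitLength (h - 1) := by
  have hdiv : PySem.Int.floordiv h 2 = h / 2 := PySem.Int.floordiv_eq_ediv_of_pos (by norm_num)
  have hle : PySem.Int.bitLength (PySem.Int.floordiv h 2 - 1) ≤
      PySem.Int.bitLength (h - PySem.Int.floordiv h 2 - 1) := by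
    apply bitLength_mono
    · rw [hdiv]; omega
    · rw [hdiv]; omega
  have := ceil_child hh
  omega

-- pieceG is symmetric under (min, max) normalisation
lemma pieceG_minmax (a b : Int) : pieceG (min a b, max a b) = pieceG (a, b) := by
  rcases le_total a b with hab | hab
  · simp [pieceG, hab]
  · simp [pieceG, hab]
    omega

lemma pieceG_zero_iff {p : Int × Int} (hp : 1 ≤ p.1 ∧ 1 ≤ p.2) :
    pieceG p = 0 ↔ (p.1 = 1 ∧ p.2 = 1) := by
  constructor
  · intro h0
    unfold pieceG at h0
    by_contra hne
    have h2 : 2 ≤ p.1 ∨ 2 ≤ p.2 := by omega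
    rcases h2 with h2 | h2
    · have := bitLength_pos (a := p.1 - 1) (by omega); omega
    · have := bitLength_pos (a := p.2 - 1) (by omega); omega
  · rintro ⟨h1, h2⟩
    simp [pieceG, h1, h2, show PySem.Int.bitLength 0 = 0 from by decide]

-- children of a positive piece are positive
lemma child_pos {p c : Int × Int} (hp : 1 ≤ p.1 ∧ 1 ≤ p.2) (hc : c ∈ child p) :
    1 ≤ c.1 ∧ 1 ≤ c.2 := by
  unfold child at hc
  split_ifs at hc with h11
  · simp at hc
  · have hmax : 2 ≤ max p.1 p.2 := by
      rcases le_total p.1 p.2 with h | h <;> simp [h] <;> omega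
    have hdiv : PySem.Int.floordiv (max p.1 p.2) 2 = (max p.1 p.2) / 2 :=
      PySem.Int.floordiv_eq_ediv_of_pos (by norm_num)
    have hmin : 1 ≤ min p.1 p.2 := by
      rcases le_total p.1 p.2 with h | h <;> simp [h] <;> omega
    simp only [List.mem_cons] at hc
    rcases hc with rfl | rfl | h
    · exact ⟨hmin, by rw [hdiv]; omega⟩
    · exact ⟨hmin, by rw [hdiv]; omega⟩
    · simp at h

-- every child's round count is exactly one less than or at most one less than the parent's;
-- the second child attains exactly one less
lemma child_g_le {p c : Int × Int} (hp : 1 ≤ p.1 ∧ 1 ≤ p.2) (hc : c ∈ child p) :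
    pieceG c + 1 ≤ pieceG p := by
  unfold child at hc
  split_ifs at hc with h11
  · simp at hc
  · have hmax : 2 ≤ max p.1 p.2 := by
      rcases le_total p.1 p.2 with h | h <;> simp [h] <;> omega
    have hG : pieceG p = PySem.Int.bitLength (min p.1 p.2 - 1) +
        PySem.Int.bitLength (max p.1 p.2 - 1) := by
      rw [← pieceG_minmax p.1 p.2]; rfl
    simp only [List.mem_cons] at hc
    rcases hc with rfl | rfl | h
    · have := floor_child hmax
      simp only [pieceG] at *
      omega
    · have := ceil_child hmax
      simp only [pieceG] at *
      omega
    · simp at h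

lemma child_g_ceil {p : Int × Int} (hp : 1 ≤ p.1 ∧ 1 ≤ p.2) (hne : ¬ (p.1 = 1 ∧ p.2 = 1)) :
    ∃ c ∈ child p, pieceG c + 1 = pieceG p := by
  have hmax : 2 ≤ max p.1 p.2 := by
    rcases le_total p.1 p.2 with h | h <;> simp [h] <;> omega
  refine ⟨(min p.1 p.2, max p.1 p.2 - PySem.Int.floordiv (max p.1 p.2) 2), ?_, ?_⟩
  · unfold child
    rw [if_neg hne]
    simp
  · have hG : pieceG p = PySem.Int.bitLength (min p.1 p.2 - 1) +
        PySem.Int.bitLength (max p.1 p.2 - 1) := by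
      rw [← pieceG_minmax p.1 p.2]; rfl
    have := ceil_child hmax
    simp only [pieceG] at *
    omega

-- maxG basics
lemma le_maxG {q : List (Int × Int)} {p : Int × Int} (hp : p ∈ q) : pieceG p ≤ maxG q := by
  induction q with
  | nil => simp at hp
  | cons x xs ih =>
    rcases List.mem_cons.mp hp with rfl | h
    · simp [maxG, List.foldr]
    · have := ih h
      simp only [maxG, List.foldr] at *
      omega

lemma maxG_le {q : List (Int × Int)} {m : Nat} (h : ∀ p ∈ q, pieceG p ≤ m) : maxG q ≤ m := by
  induction q with
  | nil => simp [maxG]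
  | cons x xs ih =>
    have h1 := h x (by simp)
    have h2 : maxG xs ≤ m := ih (fun p hp => h p (by simp [hp]))
    simp only [maxG, List.foldr] at *
    omega

lemma maxG_attained {q : List (Int × Int)} (hq : q ≠ []) : ∃ p ∈ q, pieceG p = maxG q := by
  induction q with
  | nil => exact absurd rfl hq
  | cons x xs ih =>
    by_cases hxs : xs = []
    · subst hxs
      exact ⟨x, by simp, by simp [maxG]⟩
    · obtain ⟨p, hp, hpg⟩ := ih hxs
      by_cases hle : maxG xs ≤ pieceG x
      · refine ⟨x, by simp, ?_⟩
        simp only [maxG, List.foldr] at *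
        omega
      · refine ⟨p, by simp [hp], ?_⟩
        simp only [maxG, List.foldr] at *
        omega

lemma level_pos {q : List (Int × Int)} (h : posQ q) : posQ (bfsLevel q) := by
  rw [bfsLevel_eq_flatMap]
  intro c hc
  rw [List.mem_flatMap] at hc
  obtain ⟨p, hp, hcp⟩ := hc
  exact child_pos (h p hp) hcp

lemma level_empty {q : List (Int × Int)} (hpos : posQ q) (h0 : maxG q = 0) :
    bfsLevel q = [] := by
  rw [bfsLevel_eq_flatMap]
  rw [List.flatMap_eq_nil_iff]
  intro p hp
  have hg : pieceG p = 0 := by have := le_maxG hp; omega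
  have h11 := (pieceG_zero_iff (hpos p hp)).mp hg
  simp [child, h11]

lemma level_maxG {q : List (Int × Int)} (hpos : posQ q) (hq : q ≠ []) {m : Nat}
    (hm : maxG q = m + 1) : bfsLevel q ≠ [] ∧ maxG (bfsLevel q) = m := by
  obtain ⟨p, hp, hpg⟩ := maxG_attained hq
  have hpne : ¬ (p.1 = 1 ∧ p.2 = 1) := by
    intro h11
    have := (pieceG_zero_iff (hpos p hp)).mpr h11
    omega
  obtain ⟨c, hc, hcg⟩ := child_g_ceil (hpos p hp) hpne
  have hcmem : c ∈ bfsLevel q := by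
    rw [bfsLevel_eq_flatMap, List.mem_flatMap]
    exact ⟨p, hp, hc⟩
  constructor
  · intro hnil; rw [hnil] at hcmem; simp at hcmem
  · apply le_antisymm
    · apply maxG_le
      intro c' hc'
      rw [bfsLevel_eq_flatMap, List.mem_flatMap] at hc'
      obtain ⟨p', hp', hcp'⟩ := hc'
      have h1 := child_g_le (hpos p' hp') hcp'
      have h2 := le_maxG hp'
      omega
    · have := le_maxG hcmem
      omega

lemma loop_eq : ∀ (f : Nat) (q : List (Int × Int)) (c : Int),
    posQ q → q ≠ [] → maxG q < f → bfsLoop f q c = c + maxG q := by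
  intro f
  induction f with
  | zero => intro q c _ _ h; omega
  | succ f ih =>
    intro q c hpos hq hf
    rcases q with _ | ⟨x, xs⟩
    · exact absurd rfl hq
    show bfsLoop f (bfsLevel (x :: xs))
        (if (bfsLevel (x :: xs)).isEmpty then c else c + 1) = c + maxG (x :: xs)
    rcases Nat.eq_zero_or_eq_succ_pred (maxG (x :: xs)) with h0 | hsucc
    · have hnil := level_empty hpos h0
      simp only [hnil, List.isEmpty_nil]
      cases f <;> simp [bfsLoop, h0]
    · set m := (maxG (x :: xs)).pred with hm
      obtain ⟨hne, hmx⟩ := level_maxG hpos (by simp) (m := m) (by omega)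
      have hie : (bfsLevel (x :: xs)).isEmpty = false := by
        rw [List.isEmpty_eq_false_iff]
        exact hne
      simp only [hie, Bool.false_eq_true, if_false]
      rw [ih _ _ (level_pos hpos) hne (by omega), hmx]
      omega

-- ===== VERDICT (by name: the statement is the Claim_ definition above) =====
theorem bfs_spec : Claim_equal_bfs := by
  intro width height _hdom hpre
  obtain ⟨hw, hh⟩ := hpre
  unfold Spec_bfs bfs bfs_alt
  simp only []
  set a := min width height with ha
  set b := max width height with hb
  have ha1 : 1 ≤ a := le_min hw hh
  have hb1 : 1 ≤ b := le_trans hw (le_max_left _ _)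
  have hpg : pieceG (a, b) =
      PySem.Int.bitLength (width - 1) + PySem.Int.bitLength (height - 1) := by
    rw [ha, hb]
    simpa [pieceG] using pieceG_minmax width height
  have hab : pieceG (a, b) = PySem.Int.bitLength (a - 1) + PySem.Int.bitLength (b - 1) := by
    simp [pieceG]
  split_ifs with h11
  · have h0 : pieceG (a, b) = 0 := by
      rw [hab, h11.1, h11.2]
      simp [show PySem.Int.bitLength 0 = 0 from by decide]
    omega
  · have hpos : posQ [(a, b)] := by
      intro p hp
      simp only [List.mem_singleton] at hp
      subst hp
      exact ⟨ha1, hb1⟩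
    have hmg : maxG [(a, b)] = pieceG (a, b) := by simp [maxG]
    rw [loop_eq _ _ _ hpos (by simp) (by rw [hmg, hab]; omega), hmg]
    omega
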